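-- pv_equiv track=rewrite | github.com/PawelBlaszkiewicz/ObjectChess | main.py | rank_moves_and_coordinates
-- ===== SOURCE A (Python) =====
-- def rank_moves_and_coordinates(tab):
--     ranking = {}
--     for val in tab.values():
--         for move in val:
--             if move in ranking.keys():
--                 a = ranking[move]
--                 a += 1
--                 ranking[move] = a
--             else:
--                 ranking[move] = 1
--
--     good_moves = [i for i in ranking if ranking[i] == 1]
--     for i in good_moves:
--         if i in ranking.keys():
--             for piece in tab.keys():
--                 if i in tab[piece]:
--                     tab[piece].pop(tab[piece].index(i))
--             del ranking[i]
--     return ranking, tab, good_moves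
-- ===== SOURCE B (Python) =====
-- def rank_moves_and_coordinates(tab):
--     count = {}
--     for moves in tab.values():
--         for m in moves:
--             count[m] = count.get(m, 0) + 1
--     good_moves = [m for m, c in count.items() if c == 1]
--     for piece in tab:
--         tab[piece][:] = [m for m in tab[piece] if count[m] != 1]
--     ranking = {m: c for m, c in count.items() if c != 1}
--     return ranking, tab, good_moves
-- ===== Notes on version B (the rewrite author's own statement) =====
-- stated objective: faster
-- what changed: A re-scans every piece's move list for every unique move (pieces*good_moves membership tests plus an index+pop pass each); B counts all moves once and then rebuilds each list and the ranking with a single filter pass over the counts, removing the per-good-move inner scans.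
import Mathlib
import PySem

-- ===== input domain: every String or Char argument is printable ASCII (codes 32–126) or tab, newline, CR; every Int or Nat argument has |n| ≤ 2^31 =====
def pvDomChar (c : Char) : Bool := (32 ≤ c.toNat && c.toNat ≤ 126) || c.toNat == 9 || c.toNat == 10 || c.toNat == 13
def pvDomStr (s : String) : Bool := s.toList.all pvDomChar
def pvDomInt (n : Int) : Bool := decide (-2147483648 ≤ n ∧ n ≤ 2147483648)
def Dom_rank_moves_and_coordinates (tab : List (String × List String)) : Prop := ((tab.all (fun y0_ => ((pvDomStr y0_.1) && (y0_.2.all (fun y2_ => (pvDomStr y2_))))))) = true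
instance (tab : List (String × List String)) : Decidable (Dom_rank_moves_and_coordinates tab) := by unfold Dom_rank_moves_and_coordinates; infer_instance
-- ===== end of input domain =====

-- B counts all moves in one pass and removes unique moves by filtering each list once,
-- instead of A's per-unique-move scan over every piece's list (A mutates its dict argument
-- in place; B performs the same in-place mutation, and the theorem is about the return value).


-- ===== PORT A =====
-- 'if move in ranking.keys(): ranking[move] += 1 else: ranking[move] = 1'
def pvAstep (r : PySem.Dict String Int) (m : String) : PySem.Dict String Int :=
  match r.get? m with
  | some a => r.insert m (a + 1)
  | none   => r.insert m 1

-- body of 'for piece in tab.keys(): if i in tab[piece]: tab[piece].pop(tab[piece].index(i))'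
-- (the 'none' fallbacks are the unreachable KeyError/ValueError/IndexError branches)
def pvAremoveOne (i : String) (t : PySem.Dict String (List String)) (p : String) :
    PySem.Dict String (List String) :=
  match t.get? p with
  | none => t
  | some ms =>
    if ms.contains i then
      match PySem.List.index? ms i with
      | none => t
      | some k =>
        match PySem.List.pop? ms (k : Int) with
        | none => t
        | some (_, ms') => t.insert p ms'
    else t

def pvAremove (i : String) (t : PySem.Dict String (List String)) : PySem.Dict String (List String) :=
  t.keys.foldl (pvAremoveOne i) t

def rank_moves_and_coordinates (tab : List (String × List String)) :
    (List (String × Int)) × (List (String × List String)) × List String :=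
  let t : PySem.Dict String (List String) := PySem.Dict.mk tab
  let ranking : PySem.Dict String Int :=
    t.values.foldl (fun r val => val.foldl pvAstep r) PySem.Dict.empty
  let good_moves := ranking.keys.filter (fun i => ranking.getD i 0 == 1)
  let res := good_moves.foldl
    (fun (st : PySem.Dict String Int × PySem.Dict String (List String)) i =>
      if st.1.contains i then (st.1.erase i, pvAremove i st.2) else st)
    (ranking, t)
  (res.1.items, res.2.items, good_moves)

-- ===== PORT B =====
def rank_moves_and_coordinates_alt (tab : List (String × List String)) :
    (List (String × Int)) × (List (String × List String)) × List String :=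
  let count : PySem.Dict String Int :=
    tab.foldl (fun c kv => kv.2.foldl (fun c m => c.insert m (c.getD m 0 + 1)) c)
      PySem.Dict.empty
  let good_moves := (count.items.filter (fun p => p.2 == 1)).map (·.1)
  let tab2 := tab.map (fun kv => (kv.1, kv.2.filter (fun m => !(count.getD m 0 == 1))))
  let ranking := count.items.filter (fun p => !(p.2 == 1))
  (ranking, tab2, good_moves)

-- ===== PRECONDITION & SPEC =====
-- Pre_ excludes association lists with duplicate keys: A's argument is a Python dict,
-- in which duplicate keys cannot occur, so such lists represent no reachable input.
def Pre_rank_moves_and_coordinates (tab : List (String × List String)) : Prop :=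
  (tab.map (·.1)).Nodup
instance (tab : List (String × List String)) : Decidable (Pre_rank_moves_and_coordinates tab) := by
  unfold Pre_rank_moves_and_coordinates; infer_instance

def pvWitness_rank_moves_and_coordinates : (List (String × List String)) :=
  [("a", ["x", "y", "x"]), ("b", ["y", "z"])]

def Spec_rank_moves_and_coordinates (tab : List (String × List String)) (out : (List (String × Int)) × (List (String × List String)) × List String) : Prop := out = rank_moves_and_coordinates_alt tab
instance (tab : List (String × List String)) (out : (List (String × Int)) × (List (String × List String)) × List String) : Decidable (Spec_rank_moves_and_coordinates tab out) := by unfold Spec_rank_moves_and_coordinates; infer_instance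

-- ===== CLAIM (what is proved, stated in full; the proofs are below) =====
def Claim_equal_rank_moves_and_coordinates : Prop := ∀ (tab : List (String × List String)), Dom_rank_moves_and_coordinates tab → Pre_rank_moves_and_coordinates tab → Spec_rank_moves_and_coordinates tab (rank_moves_and_coordinates tab)


-- ===== LEMMAS AND PROOFS =====

-- the effect of one inner-loop body of A on one move list, used to characterise A's removal loop
def pvRem (i : String) (ms : List String) : List String :=
  if ms.contains i then ms.erase i else ms

theorem pvAstep_eq :
    pvAstep = fun (r : PySem.Dict String Int) m => r.insert m (r.getD m 0 + 1) := by
  funext r m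
  unfold pvAstep
  cases h : r.get? m <;> simp [PySem.Dict.getD, h]

theorem erase_eq_filter_of_count_le_one {α : Type} [DecidableEq α] (l : List α) (a : α)
    (h : l.count a ≤ 1) : l.erase a = l.filter (· != a) := by
  induction l with
  | nil => rfl
  | cons x xs ih =>
    by_cases hx : x = a
    · subst hx
      simp [List.count_cons_self] at h
      have h0 : xs.count x = 0 := by omega
      simp [List.erase_cons_head]
      exact ((List.filter_eq_self).mpr (fun b hb => by
        have hbx : b ≠ x := fun e => (List.count_eq_zero.mp h0) (e ▸ hb)
        simp [hbx])).symm
    · rw [List.erase_cons_tail (by simp [hx])]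
      simp [(by simp [hx] : (x != a) = true)]
      exact ih (le_trans (by simp [hx]) h)

theorem eraseIdx_append_cons {α : Type} (pre suf : List α) (i : α) :
    (pre ++ i :: suf).eraseIdx pre.length = pre ++ suf := by
  induction pre with
  | nil => simp
  | cons x xs ih => simpa using ih

theorem get?_erase_of_ne {ν : Type} (d : PySem.Dict String ν) (k j : String) (hne : j ≠ k) :
    (d.erase k).get? j = d.get? j := by
  show ((d.items.filter _).find? _).map _ = (d.items.find? _).map _
  congr 1
  induction d.items with
  | nil => rfl
  | cons p l ih =>
    by_cases hp : p.1 = k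
    · simp [List.filter_cons, hp, List.find?_cons, Ne.symm hne, ih]
    · by_cases hj : p.1 = j
      · simp [List.filter_cons, hp, hj, hne]
      · simp [List.filter_cons, hp, hj, ih]

theorem contains_erase_of_ne {ν : Type} (d : PySem.Dict String ν) (k j : String) (hne : j ≠ k) :
    (d.erase k).contains j = d.contains j := by
  rw [PySem.Dict.contains_eq_isSome_get?, PySem.Dict.contains_eq_isSome_get?,
    get?_erase_of_ne d k j hne]

theorem pair_fold (g : List String) (r : PySem.Dict String Int)
    (t : PySem.Dict String (List String))
    (hc : ∀ i ∈ g, r.contains i = true) (hnd : g.Nodup) :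
    g.foldl
      (fun (st : PySem.Dict String Int × PySem.Dict String (List String)) i =>
        if st.1.contains i then (st.1.erase i, pvAremove i st.2) else st) (r, t)
    = (g.foldl (fun r i => r.erase i) r, g.foldl (fun t i => pvAremove i t) t) := by
  induction g generalizing r t with
  | nil => rfl
  | cons i g ih =>
    simp only [List.foldl_cons, hc i (by simp), if_true]
    exact ih _ _
      (fun j hj => by
        rw [contains_erase_of_ne _ _ _ (fun e => (List.nodup_cons.mp hnd).1 (by rw [← e]; exact hj))]
        exact hc j (by simp [hj]))
      (List.nodup_cons.mp hnd).2

theorem foldl_erase_items (g : List String) (r : PySem.Dict String Int) :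
    (g.foldl (fun r i => r.erase i) r).items
    = r.items.filter (fun p => !g.contains p.1) := by
  induction g generalizing r with
  | nil => simp
  | cons i g ih =>
    simp only [List.foldl_cons, ih]
    show (r.items.filter _).filter _ = _
    rw [List.filter_filter]
    apply List.filter_congr
    intro p _
    by_cases h1 : p.1 = i <;> simp [h1]

theorem pvAremoveOne_items (i p : String) (d : PySem.Dict String (List String))
    (hnd : d.keys.Nodup) :
    (pvAremoveOne i d p).items
    = d.items.map (fun kv => if kv.1 = p then (kv.1, pvRem i kv.2) else kv) := by
  unfold pvAremoveOne
  cases h : d.get? p with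
  | none =>
    have hp : p ∉ d.keys := (PySem.Dict.get?_eq_none_iff_not_mem_keys d p).mp h
    symm
    rw [List.map_congr_left (g := id) (fun kv hkv => by
      have : kv.1 ≠ p := fun e => hp (e ▸ PySem.Dict.mem_keys_of_mem_items d hkv)
      simp [this])]
    simp
  | some ms =>
    have hmem : (p, ms) ∈ d.items := PySem.Dict.mem_items_of_get?_eq_some d h
    by_cases hci : ms.contains i
    · simp only [hci, if_true]
      have hmemi : i ∈ ms := by simpa using hci
      obtain ⟨k, hk⟩ := Option.isSome_iff_exists.mp
        ((PySem.List.index?_isSome_iff (xs := ms) (v := i)).mpr hmemi)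
      rw [hk]; dsimp only
      obtain ⟨pre, suf, hms, hlen, hpre⟩ := ((PySem.List.index?_eq_some_iff ms i k).mp hk)
      obtain ⟨hklt, -, -⟩ := PySem.List.getElem_of_index?_eq_some hk
      rw [PySem.List.pop?_natCast ms k hklt]; dsimp only
      have herase : ms.eraseIdx k = ms.erase i := by
        subst hms; subst hlen
        rw [eraseIdx_append_cons, List.erase_append_right _ (by simpa using hpre)]
        simp
      have hcont : d.contains p = true := by
        rw [PySem.Dict.contains_eq_isSome_get?, h]; rfl
      rw [PySem.Dict.items_insert_of_contains d _ hcont]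
      apply List.map_congr_left
      intro kv hkv
      by_cases hkp : kv.1 = p
      · have : kv.2 = ms := by
          have := PySem.Dict.get?_of_mem_items d (k := kv.1) (v := kv.2) (by simpa using hkv) hnd
          rw [hkp, h] at this
          exact (Option.some_injective _ this).symm
        simp [hkp, this, pvRem, hci, herase]
      · simp [hkp, (by simp [hkp] : (kv.1 == p) = false)]
    · simp only [hci, if_false]
      symm
      rw [List.map_congr_left (g := id) (fun kv hkv => by
        obtain ⟨a, b⟩ := kv
        by_cases hkp : a = p
        · have hb : b = ms := by
            have := PySem.Dict.get?_of_mem_items d (k := a) (v := b) (by simpa using hkv) hnd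
            rw [hkp, h] at this
            exact (Option.some_injective _ this).symm
          have hnotin : i ∉ ms := fun hm => hci (List.contains_iff_mem.mpr hm)
          simp [hkp, hb, pvRem, hnotin]
        · simp [hkp])]
      simp

theorem pvAremoveOne_keys (i p : String) (d : PySem.Dict String (List String))
    (hnd : d.keys.Nodup) : (pvAremoveOne i d p).keys = d.keys := by
  show (pvAremoveOne i d p).items.map (·.1) = d.items.map (·.1)
  rw [pvAremoveOne_items i p d hnd, List.map_map]
  apply List.map_congr_left
  intro kv _
  by_cases h : kv.1 = p <;> simp [h]

theorem foldl_removeOne (i : String) (ks : List String) (d : PySem.Dict String (List String))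
    (hnd : d.keys.Nodup) (hks : ks.Nodup) :
    (ks.foldl (pvAremoveOne i) d).items
    = d.items.map (fun kv => if kv.1 ∈ ks then (kv.1, pvRem i kv.2) else kv) := by
  induction ks generalizing d with
  | nil =>
    symm
    rw [List.map_congr_left (g := id) (fun kv _ => by simp)]
    simp
  | cons k ks ih =>
    simp only [List.foldl_cons]
    rw [ih (pvAremoveOne i d k)
        (by rw [pvAremoveOne_keys i k d hnd]; exact hnd) (List.nodup_cons.mp hks).2,
      pvAremoveOne_items i k d hnd, List.map_map]
    apply List.map_congr_left
    intro kv _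
    by_cases hkp : kv.1 = k
    · simp [Function.comp, hkp, (List.nodup_cons.mp hks).1]
    · by_cases hmem : kv.1 ∈ ks <;> simp [Function.comp, hkp, hmem]

theorem pvAremove_items (i : String) (d : PySem.Dict String (List String))
    (hnd : d.keys.Nodup) :
    (pvAremove i d).items = d.items.map (fun kv => (kv.1, pvRem i kv.2)) := by
  unfold pvAremove
  rw [foldl_removeOne i d.keys d hnd hnd]
  apply List.map_congr_left
  intro kv hkv
  simp [PySem.Dict.mem_keys_of_mem_items d hkv]

theorem pvAremove_keys (i : String) (d : PySem.Dict String (List String))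
    (hnd : d.keys.Nodup) : (pvAremove i d).keys = d.keys := by
  show (pvAremove i d).items.map (·.1) = d.items.map (·.1)
  rw [pvAremove_items i d hnd, List.map_map]
  rfl

theorem foldl_pvAremove (g : List String) (d : PySem.Dict String (List String))
    (hnd : d.keys.Nodup) :
    (g.foldl (fun t i => pvAremove i t) d).items
    = d.items.map (fun kv => (kv.1, g.foldl (fun ms i => pvRem i ms) kv.2)) := by
  induction g generalizing d with
  | nil => simp
  | cons i g ih =>
    simp only [List.foldl_cons]
    rw [ih (pvAremove i d) (by rw [pvAremove_keys i d hnd]; exact hnd),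
      pvAremove_items i d hnd, List.map_map]
    rfl

theorem foldl_pvRem (g : List String) (ms : List String)
    (h : ∀ i ∈ g, ms.count i ≤ 1) :
    g.foldl (fun ms i => pvRem i ms) ms = ms.filter (fun m => !g.contains m) := by
  induction g generalizing ms with
  | nil => simp
  | cons i g ih =>
    simp only [List.foldl_cons]
    have hrem : pvRem i ms = ms.filter (· != i) := by
      unfold pvRem
      by_cases hci : ms.contains i
      · simp only [hci, if_true]
        exact erase_eq_filter_of_count_le_one ms i (h i (by simp))
      · simp only [hci, if_false]
        symm
        exact List.filter_eq_self.mpr (fun b hb => by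
          have : b ≠ i := fun e => absurd (List.contains_iff_mem.mpr (e ▸ hb)) (by simpa using hci)
          simp [this])
    rw [hrem, ih _ (fun j hj => le_trans (List.Sublist.count_le _ (List.filter_sublist)) (h j (by simp [hj]))),
      List.filter_filter]
    apply List.filter_congr
    intro m _
    by_cases h1 : m = i <;> simp [h1]

-- ===== VERDICT (by name: the statement is the Claim_ definition above) =====
theorem pv_main (tab : List (String × List String))
    (hpre : (tab.map (·.1)).Nodup) :
    rank_moves_and_coordinates tab = rank_moves_and_coordinates_alt tab := by
  unfold rank_moves_and_coordinates rank_moves_and_coordinates_alt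
  dsimp only
  rw [pvAstep_eq]
  have hv : (PySem.Dict.mk tab : PySem.Dict String (List String)).values
      = tab.map (fun kv => kv.2) := rfl
  have hnd : (PySem.Dict.mk tab : PySem.Dict String (List String)).keys.Nodup := hpre
  rw [hv]
  have hcntA : (tab.map (fun kv => kv.2)).foldl
      (fun r val => val.foldl (fun r m => r.insert m (r.getD m 0 + 1)) r) PySem.Dict.empty
      = PySem.Dict.counter (tab.map (fun kv => kv.2)).flatten := by
    rw [← List.foldl_flatten]
    exact PySem.Dict.foldl_insert_getD_add_one_eq_counter _
  have hcntB : tab.foldl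
      (fun c kv => kv.2.foldl (fun c m => c.insert m (c.getD m 0 + 1)) c) PySem.Dict.empty
      = PySem.Dict.counter (tab.map (fun kv => kv.2)).flatten := by
    rw [← List.foldl_map]
    rw [← List.foldl_flatten]
    exact PySem.Dict.foldl_insert_getD_add_one_eq_counter _
  rw [hcntA, hcntB]
  set all := (tab.map (fun kv => kv.2)).flatten with hall
  set cnt := PySem.Dict.counter all with hcnt
  set good := cnt.keys.filter (fun i => cnt.getD i 0 == 1) with hgood
  -- characterisation of good
  have hmem_good : ∀ i, i ∈ good ↔ i ∈ PySem.Set.ofList all ∧ all.count i = 1 := by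
    intro i
    rw [hgood, List.mem_filter, hcnt, PySem.Dict.keys_counter, PySem.Dict.getD_counter]
    constructor
    · rintro ⟨h1, h2⟩
      refine ⟨h1, ?_⟩
      have := beq_iff_eq.mp h2
      exact_mod_cast this
    · rintro ⟨h1, h2⟩
      exact ⟨h1, beq_iff_eq.mpr (by exact_mod_cast h2)⟩
  have hgood_nodup : good.Nodup := by
    rw [hgood, hcnt, PySem.Dict.keys_counter]
    exact (PySem.Set.nodup_ofList all).filter _
  have hc : ∀ i ∈ good, cnt.contains i = true := by
    intro i hi
    exact (PySem.Dict.contains_iff_mem_keys cnt i).mpr (List.mem_filter.mp (hgood ▸ hi)).1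
  have hbool : ∀ k, k ∈ PySem.Set.ofList all → good.contains k = ((all.count k : Int) == 1) := by
    intro k hk
    by_cases h1 : all.count k = 1
    · rw [List.contains_iff_mem.mpr ((hmem_good k).mpr ⟨hk, h1⟩)]
      simp [h1]
    · have : k ∉ good := fun hg => h1 ((hmem_good k).mp hg).2
      rw [(by simpa using this : good.contains k = false)]
      symm
      simp only [beq_eq_false_iff_ne, ne_eq]
      exact fun e => h1 (by exact_mod_cast e)
  rw [pair_fold good cnt (PySem.Dict.mk tab) hc hgood_nodup]
  refine Prod.ext ?_ (Prod.ext ?_ ?_)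
  · -- ranking component
    show (good.foldl (fun r i => r.erase i) cnt).items = cnt.items.filter (fun p => !(p.2 == 1))
    rw [foldl_erase_items, hcnt, PySem.Dict.items_counter, List.filter_map, List.filter_map]
    congr 1
    apply List.filter_congr
    intro k hk
    simp only [Function.comp]
    rw [hbool k hk]
  · -- tab component
    show (good.foldl (fun t i => pvAremove i t) (PySem.Dict.mk tab)).items
        = tab.map (fun kv => (kv.1, kv.2.filter (fun m => !(cnt.getD m 0 == 1))))
    rw [foldl_pvAremove good (PySem.Dict.mk tab) hnd]
    apply List.map_congr_left
    intro kv hkv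
    have hle : ∀ i ∈ good, kv.2.count i ≤ 1 := by
      intro i hi
      have h1 : all.count i = 1 := ((hmem_good i).mp hi).2
      have hmemc : List.count i kv.2 ∈ (tab.map (fun kv => kv.2)).map (List.count i) :=
        List.mem_map.mpr ⟨kv.2, List.mem_map.mpr ⟨kv, hkv, rfl⟩, rfl⟩
      have := List.single_le_sum (fun x _ => Nat.zero_le x) _ hmemc
      rw [← List.count_flatten, ← hall] at this
      omega
    rw [foldl_pvRem good kv.2 hle]
    congr 1
    apply List.filter_congr
    intro m hm
    have hmall : m ∈ all := by
      rw [hall, List.mem_flatten]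
      exact ⟨kv.2, List.mem_map.mpr ⟨kv, hkv, rfl⟩, hm⟩
    rw [hbool m ((PySem.Set.mem_ofList all m).mpr hmall), hcnt, PySem.Dict.getD_counter]
  · -- good_moves component
    show good = (cnt.items.filter (fun p => p.2 == 1)).map (fun p => p.1)
    rw [hcnt, PySem.Dict.items_counter, List.filter_map, List.map_map]
    rw [hgood, hcnt, PySem.Dict.keys_counter]
    simp only [PySem.Dict.getD_counter]
    simp [Function.comp_def]

-- ===== VERDICT (by name: the statement is the Claim_ definition above) =====
theorem rank_moves_and_coordinates_spec : Claim_equal_rank_moves_and_coordinates := by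
  intro tab _ hpre
  exact pv_main tab hpre
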